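-- pv_equiv track=rewrite | github.com/oridwan/HT-GenDFT | results_plot/plot_ter_chull_appen.py | reorder_elements_for_boundary
-- ===== SOURCE A (Python) =====
-- from typing import Dict, List, Tuple
--
-- GROUP_I_II_III = ['Li', 'Na', 'K', 'Rb', 'Cs', 'Mg', 'Ca', 'Sr', 'Ba', 'Sc', 'Y']
--
-- GROUP_III_IV = ['B', 'Al', 'Ga', 'In', 'C', 'Si', 'Ge', 'Sn', 'Pb']
--
-- GROUP_V_VI_VII = ['N', 'P', 'As', 'Sb', 'O', 'S', 'Se', 'Te', 'F', 'Cl', 'Br', 'I', 'H']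
--
-- def reorder_elements_for_boundary(elements: List[str]) -> Tuple[List[str], List[int]]:
--     """Reorder elements to match search_ternary_electrides.py convention."""
--     elem_groups = []
--     for elem in elements:
--         if elem in GROUP_I_II_III:
--             elem_groups.append((0, elem))
--         elif elem in GROUP_III_IV:
--             elem_groups.append((1, elem))
--         elif elem in GROUP_V_VI_VII:
--             elem_groups.append((2, elem))
--         else:
--             elem_groups.append((3, elem))
--
--     elem_groups_sorted = sorted(elem_groups, key=lambda x: x[0])
--     reordered = [elem for _, elem in elem_groups_sorted]
--
--     index_mapping = [elements.index(elem) for elem in reordered]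
--
--     return reordered, index_mapping
-- ===== SOURCE B (Python) =====
-- from typing import Dict, List, Tuple
--
-- GROUP_I_II_III = ['Li', 'Na', 'K', 'Rb', 'Cs', 'Mg', 'Ca', 'Sr', 'Ba', 'Sc', 'Y']
--
-- GROUP_III_IV = ['B', 'Al', 'Ga', 'In', 'C', 'Si', 'Ge', 'Sn', 'Pb']
--
-- GROUP_V_VI_VII = ['N', 'P', 'As', 'Sb', 'O', 'S', 'Se', 'Te', 'F', 'Cl', 'Br', 'I', 'H']
--
-- def reorder_elements_for_boundary(elements: List[str]) -> Tuple[List[str], List[int]]: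
--     """Reorder elements to match search_ternary_electrides.py convention.
--
--     Bucket pass instead of decorate-sort-undecorate, and a first-occurrence
--     index dictionary instead of repeated list.index scans."""
--     b0, b1, b2, b3 = [], [], [], []
--     for elem in elements:
--         if elem in GROUP_I_II_III:
--             b0.append(elem)
--         elif elem in GROUP_III_IV:
--             b1.append(elem)
--         elif elem in GROUP_V_VI_VII:
--             b2.append(elem)
--         else:
--             b3.append(elem)
--     reordered = b0 + b1 + b2 + b3
--
--     first = {}
--     for i, elem in enumerate(elements):
--         if elem not in first:
--             first[elem] = i
--     index_mapping = [first[elem] for elem in reordered]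
--
--     return reordered, index_mapping
-- ===== Notes on version B (the rewrite author's own statement) =====
-- stated objective: faster
-- what changed: Replaces the decorate/stable-sort/undecorate pass with four group buckets filled in one pass and concatenated, and replaces the per-element elements.index scan with a first-occurrence index dictionary built once.
import Mathlib
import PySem

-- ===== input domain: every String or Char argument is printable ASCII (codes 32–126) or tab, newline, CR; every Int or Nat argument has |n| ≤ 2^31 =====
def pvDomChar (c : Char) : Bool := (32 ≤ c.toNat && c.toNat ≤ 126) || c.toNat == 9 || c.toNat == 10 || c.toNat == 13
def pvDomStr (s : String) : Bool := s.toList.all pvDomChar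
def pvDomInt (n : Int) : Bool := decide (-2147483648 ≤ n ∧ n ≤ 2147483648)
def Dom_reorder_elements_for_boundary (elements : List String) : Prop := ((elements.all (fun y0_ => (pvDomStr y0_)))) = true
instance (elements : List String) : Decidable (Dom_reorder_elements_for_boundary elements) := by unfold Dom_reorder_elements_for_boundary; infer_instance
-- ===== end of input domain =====

-- B replaces A's decorate/stable-sort/undecorate and per-element list.index scans by one
-- bucketing pass plus a first-occurrence index dictionary (objective: faster).

-- ===== PORT A =====
def GROUP_I_II_III : List String := ["Li", "Na", "K", "Rb", "Cs", "Mg", "Ca", "Sr", "Ba", "Sc", "Y"]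

def GROUP_III_IV : List String := ["B", "Al", "Ga", "In", "C", "Si", "Ge", "Sn", "Pb"]

def GROUP_V_VI_VII : List String := ["N", "P", "As", "Sb", "O", "S", "Se", "Te", "F", "Cl", "Br", "I", "H"]

def reorder_elements_for_boundary (elements : List String) : List String × List Int :=
  let elem_groups : List (Int × String) :=
    elements.foldl (fun acc elem =>
      if GROUP_I_II_III.contains elem then acc ++ [((0 : Int), elem)]
      else if GROUP_III_IV.contains elem then acc ++ [((1 : Int), elem)]
      else if GROUP_V_VI_VII.contains elem then acc ++ [((2 : Int), elem)]
      else acc ++ [((3 : Int), elem)]) []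
  let elem_groups_sorted := PySem.List.sorted elem_groups (fun x => x.1) false
  let reordered := elem_groups_sorted.map (fun p => p.2)
  -- elements.index(elem): elem ∈ elements always holds here, so ValueError is unreachable and getD 0 is exact
  let index_mapping := reordered.map (fun elem => (((PySem.List.index? elements elem).getD 0 : Nat) : Int))
  (reordered, index_mapping)

-- ===== PORT B =====
def reorder_elements_for_boundary_alt (elements : List String) : List String × List Int :=
  let bs := elements.foldl
    (fun (acc : List String × List String × List String × List String) elem =>
      if GROUP_I_II_III.contains elem then (acc.1 ++ [elem], acc.2.1, acc.2.2.1, acc.2.2.2)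
      else if GROUP_III_IV.contains elem then (acc.1, acc.2.1 ++ [elem], acc.2.2.1, acc.2.2.2)
      else if GROUP_V_VI_VII.contains elem then (acc.1, acc.2.1, acc.2.2.1 ++ [elem], acc.2.2.2)
      else (acc.1, acc.2.1, acc.2.2.1, acc.2.2.2 ++ [elem])) ([], [], [], [])
  let reordered := bs.1 ++ bs.2.1 ++ bs.2.2.1 ++ bs.2.2.2
  let first := (PySem.List.enumerate elements 0).foldl
    (fun d p => if d.contains p.2 then d else d.insert p.2 p.1) PySem.Dict.empty
  -- first[elem]: elem is always a key of first here, so KeyError is unreachable and getD 0 is exact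
  let index_mapping := reordered.map (fun elem => (first.get? elem).getD 0)
  (reordered, index_mapping)

-- ===== PRECONDITION & SPEC =====
def Spec_reorder_elements_for_boundary (elements : List String) (out : List String × List Int) : Prop := out = reorder_elements_for_boundary_alt elements
instance (elements : List String) (out : List String × List Int) : Decidable (Spec_reorder_elements_for_boundary elements out) := by unfold Spec_reorder_elements_for_boundary; infer_instance

-- ===== CLAIM (what is proved, stated in full; the proofs are below) =====
def Claim_equal_reorder_elements_for_boundary : Prop := ∀ (elements : List String), Dom_reorder_elements_for_boundary elements → Spec_reorder_elements_for_boundary elements (reorder_elements_for_boundary elements)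

-- ===== LEMMAS AND PROOFS =====

-- the group code A attaches to an element (and by which B buckets)
def pvGrp (e : String) : Int :=
  if GROUP_I_II_III.contains e then 0
  else if GROUP_III_IV.contains e then 1
  else if GROUP_V_VI_VII.contains e then 2
  else 3

lemma pvGrp_cases (e : String) : pvGrp e = 0 ∨ pvGrp e = 1 ∨ pvGrp e = 2 ∨ pvGrp e = 3 := by
  unfold pvGrp; split_ifs <;> simp

lemma foldlA_eq (l : List String) (acc : List (Int × String)) :
    l.foldl (fun acc elem =>
      if GROUP_I_II_III.contains elem then acc ++ [((0 : Int), elem)]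
      else if GROUP_III_IV.contains elem then acc ++ [((1 : Int), elem)]
      else if GROUP_V_VI_VII.contains elem then acc ++ [((2 : Int), elem)]
      else acc ++ [((3 : Int), elem)]) acc
      = acc ++ l.map (fun e => (pvGrp e, e)) := by
  induction l generalizing acc with
  | nil => simp
  | cons x l ih =>
    simp only [List.foldl_cons, List.map_cons]
    split_ifs with h1 h2 h3 <;> rw [ih] <;> simp_all [pvGrp]

lemma insertBy_split {α : Type} (before : α → α → Bool) (x : α) (as bs : List α)
    (ha : ∀ y ∈ as, before x y = false) (hb : ∀ y ∈ bs, before x y = true) :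
    PySem.List.insertBy before x (as ++ bs) = as ++ x :: bs := by
  induction as with
  | nil =>
    cases bs with
    | nil => simp [PySem.List.insertBy]
    | cons y ys => simp [PySem.List.insertBy, hb y (by simp)]
  | cons a as ih =>
    have hfa := ha a (by simp)
    simp only [List.cons_append, PySem.List.insertBy, hfa]
    simp only [Bool.false_eq_true, if_false, List.cons.injEq, true_and]
    exact ih (fun y hy => ha y (by simp [hy]))

-- bucket filters of the tagged list
def pvF (i : Int) (l : List (Int × String)) : List (Int × String) := l.filter (fun p => p.1 == i)

lemma foldl_insertBy_buckets (l : List (Int × String)) (c0 c1 c2 c3 : List (Int × String))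
    (hl : ∀ p ∈ l, p.1 = 0 ∨ p.1 = 1 ∨ p.1 = 2 ∨ p.1 = 3)
    (h0 : ∀ p ∈ c0, p.1 = 0) (h1 : ∀ p ∈ c1, p.1 = 1)
    (h2 : ∀ p ∈ c2, p.1 = 2) (h3 : ∀ p ∈ c3, p.1 = 3) :
    l.foldl (fun acc x => PySem.List.insertBy (fun a b => decide (a.1 < b.1)) x acc)
      (c0 ++ c1 ++ c2 ++ c3)
    = (c0 ++ pvF 0 l) ++ (c1 ++ pvF 1 l) ++ (c2 ++ pvF 2 l) ++ (c3 ++ pvF 3 l) := by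
  induction l generalizing c0 c1 c2 c3 with
  | nil => simp [pvF]
  | cons x l ih =>
    simp only [List.foldl_cons]
    have hx := hl x (by simp)
    have hl' : ∀ p ∈ l, p.1 = 0 ∨ p.1 = 1 ∨ p.1 = 2 ∨ p.1 = 3 := fun p hp => hl p (by simp [hp])
    rcases hx with hx | hx | hx | hx
    · have step : PySem.List.insertBy (fun a b => decide (a.1 < b.1)) x (c0 ++ c1 ++ c2 ++ c3)
          = (c0 ++ [x]) ++ c1 ++ c2 ++ c3 := by
        have := insertBy_split (fun a b : Int × String => decide (a.1 < b.1)) x c0 (c1 ++ c2 ++ c3)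
          (fun y hy => by simp [h0 y hy, hx])
          (fun y hy => by
            rcases List.mem_append.1 hy with hy | hy
            · rcases List.mem_append.1 hy with hy | hy
              · simp [h1 y hy, hx]
              · simp [h2 y hy, hx]
            · simp [h3 y hy, hx])
        simpa [List.append_assoc] using this
      rw [step, ih (c0 ++ [x]) c1 c2 c3 hl'
        (by intro p hp; rcases List.mem_append.1 hp with hp | hp
            · exact h0 p hp
            · simp at hp; simp [hp, hx]) h1 h2 h3]
      simp [pvF, hx, List.append_assoc]
    · have step : PySem.List.insertBy (fun a b => decide (a.1 < b.1)) x (c0 ++ c1 ++ c2 ++ c3)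
          = c0 ++ (c1 ++ [x]) ++ c2 ++ c3 := by
        have := insertBy_split (fun a b : Int × String => decide (a.1 < b.1)) x (c0 ++ c1) (c2 ++ c3)
          (fun y hy => by
            rcases List.mem_append.1 hy with hy | hy
            · simp [h0 y hy, hx]
            · simp [h1 y hy, hx])
          (fun y hy => by
            rcases List.mem_append.1 hy with hy | hy
            · simp [h2 y hy, hx]
            · simp [h3 y hy, hx])
        simpa [List.append_assoc] using this
      rw [step, ih c0 (c1 ++ [x]) c2 c3 hl' h0
        (by intro p hp; rcases List.mem_append.1 hp with hp | hp
            · exact h1 p hp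
            · simp at hp; simp [hp, hx]) h2 h3]
      simp [pvF, hx, List.append_assoc]
    · have step : PySem.List.insertBy (fun a b => decide (a.1 < b.1)) x (c0 ++ c1 ++ c2 ++ c3)
          = c0 ++ c1 ++ (c2 ++ [x]) ++ c3 := by
        have := insertBy_split (fun a b : Int × String => decide (a.1 < b.1)) x (c0 ++ c1 ++ c2) c3
          (fun y hy => by
            rcases List.mem_append.1 hy with hy | hy
            · rcases List.mem_append.1 hy with hy | hy
              · simp [h0 y hy, hx]
              · simp [h1 y hy, hx]
            · simp [h2 y hy, hx])
          (fun y hy => by simp [h3 y hy, hx])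
        simpa [List.append_assoc] using this
      rw [step, ih c0 c1 (c2 ++ [x]) c3 hl' h0 h1
        (by intro p hp; rcases List.mem_append.1 hp with hp | hp
            · exact h2 p hp
            · simp at hp; simp [hp, hx]) h3]
      simp [pvF, hx, List.append_assoc]
    · have step : PySem.List.insertBy (fun a b => decide (a.1 < b.1)) x (c0 ++ c1 ++ c2 ++ c3)
          = c0 ++ c1 ++ c2 ++ (c3 ++ [x]) := by
        have := insertBy_split (fun a b : Int × String => decide (a.1 < b.1)) x (c0 ++ c1 ++ c2 ++ c3) []
          (fun y hy => by
            rcases List.mem_append.1 hy with hy | hy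
            · rcases List.mem_append.1 hy with hy | hy
              · rcases List.mem_append.1 hy with hy | hy
                · simp [h0 y hy, hx]
                · simp [h1 y hy, hx]
              · simp [h2 y hy, hx]
            · simp [h3 y hy, hx])
          (fun y hy => by simp at hy)
        simpa [List.append_assoc] using this
      rw [step, ih c0 c1 c2 (c3 ++ [x]) hl' h0 h1 h2
        (by intro p hp; rcases List.mem_append.1 hp with hp | hp
            · exact h3 p hp
            · simp at hp; simp [hp, hx])]
      simp [pvF, hx, List.append_assoc]

lemma sorted_tagged (l : List String) :
    PySem.List.sorted (l.map (fun e => (pvGrp e, e))) (fun x => x.1) false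
    = pvF 0 (l.map (fun e => (pvGrp e, e))) ++ pvF 1 (l.map (fun e => (pvGrp e, e)))
      ++ pvF 2 (l.map (fun e => (pvGrp e, e))) ++ pvF 3 (l.map (fun e => (pvGrp e, e))) := by
  rw [PySem.List.sorted_eq_foldl_insertBy]
  have := foldl_insertBy_buckets (l.map (fun e => (pvGrp e, e))) [] [] [] []
    (by intro p hp; simp at hp; obtain ⟨e, _, rfl⟩ := hp; exact pvGrp_cases e)
    (by simp) (by simp) (by simp) (by simp)
  simpa [List.append_assoc] using this

lemma map_snd_pvF (i : Int) (l : List String) :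
    (pvF i (l.map (fun e => (pvGrp e, e)))).map (fun p => p.2)
    = l.filter (fun e => pvGrp e == i) := by
  induction l with
  | nil => rfl
  | cons x l ih =>
    by_cases h : pvGrp x = i <;> simp [pvF, h] at ih ⊢ <;> simp [ih]

lemma foldlB_eq (l : List String) (a b c d : List String) :
    l.foldl (fun (acc : List String × List String × List String × List String) elem =>
      if GROUP_I_II_III.contains elem then (acc.1 ++ [elem], acc.2.1, acc.2.2.1, acc.2.2.2)
      else if GROUP_III_IV.contains elem then (acc.1, acc.2.1 ++ [elem], acc.2.2.1, acc.2.2.2)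
      else if GROUP_V_VI_VII.contains elem then (acc.1, acc.2.1, acc.2.2.1 ++ [elem], acc.2.2.2)
      else (acc.1, acc.2.1, acc.2.2.1, acc.2.2.2 ++ [elem])) (a, b, c, d)
    = (a ++ l.filter (fun e => pvGrp e == 0), b ++ l.filter (fun e => pvGrp e == 1),
       c ++ l.filter (fun e => pvGrp e == 2), d ++ l.filter (fun e => pvGrp e == 3)) := by
  induction l generalizing a b c d with
  | nil => simp
  | cons x l ih =>
    simp only [List.foldl_cons]
    split_ifs with h1 h2 h3 <;>
      rw [ih] <;>
      simp_all [pvGrp, List.append_assoc]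

lemma index?_isSome_of_mem (l : List String) (e : String) (h : e ∈ l) :
    ∃ k, PySem.List.index? l e = some k := by
  induction l with
  | nil => simp at h
  | cons x l ih =>
    by_cases hx : x = e
    · subst hx; exact ⟨0, PySem.List.index?_cons_self x l⟩
    · have he : e ∈ l := by
        rcases List.mem_cons.1 h with h | h
        · exact absurd h.symm hx
        · exact h
      obtain ⟨k, hk⟩ := ih he
      exact ⟨k + 1, by rw [PySem.List.index?_cons_of_ne l hx, hk]; rfl⟩

lemma get?_firstFold (l : List String) (e : String) : ∀ (s : Int) (d : PySem.Dict String Int),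
    ((PySem.List.enumerate l s).foldl
      (fun d p => if d.contains p.2 then d else d.insert p.2 p.1) d).get? e
    = (d.get? e).or ((PySem.List.index? l e).map (fun k => s + (k : Int))) := by
  induction l with
  | nil => intro s d; simp [PySem.List.enumerate, PySem.List.index?]
  | cons x l ih =>
    intro s d
    rw [PySem.List.enumerate_cons, List.foldl_cons, ih]
    by_cases hx : x = e
    · subst hx
      rw [PySem.List.index?_cons_self]
      by_cases hc : d.contains x
      · have : (d.get? x).isSome := by rw [← PySem.Dict.contains_eq_isSome_get?]; exact hc
        obtain ⟨v, hv⟩ := Option.isSome_iff_exists.1 this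
        simp [hc, hv]
      · have : d.get? x = none := by
          rcases h : d.get? x with _ | v
          · rfl
          · rw [PySem.Dict.contains_eq_isSome_get?, h] at hc; simp at hc
        simp [hc, this, PySem.Dict.get?_insert_self]
    · have hd : ∀ (d' : PySem.Dict String Int), (if d.contains x then d else d.insert x s) = d' →
          d'.get? e = d.get? e := by
        intro d' hd'; subst hd'
        split_ifs
        · rfl
        · exact PySem.Dict.get?_insert_of_ne _ _ (fun h => hx h.symm)
      rw [hd _ rfl, PySem.List.index?_cons_of_ne l hx]
      cases PySem.List.index? l e with
      | none => simp
      | some k =>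
        cases d.get? e with
        | none => simp; omega
        | some v => simp

-- ===== VERDICT (by name: the statement is the Claim_ definition above) =====
theorem reorder_elements_for_boundary_spec : Claim_equal_reorder_elements_for_boundary := by
  intro elements _
  unfold Spec_reorder_elements_for_boundary
  unfold reorder_elements_for_boundary reorder_elements_for_boundary_alt
  simp only []
  rw [foldlA_eq, foldlB_eq]
  simp only [List.nil_append]
  rw [sorted_tagged]
  have hre : (pvF 0 (elements.map (fun e => (pvGrp e, e))) ++ pvF 1 (elements.map (fun e => (pvGrp e, e)))
      ++ pvF 2 (elements.map (fun e => (pvGrp e, e))) ++ pvF 3 (elements.map (fun e => (pvGrp e, e)))).map (fun p => p.2)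
      = elements.filter (fun e => pvGrp e == 0) ++ elements.filter (fun e => pvGrp e == 1)
        ++ elements.filter (fun e => pvGrp e == 2) ++ elements.filter (fun e => pvGrp e == 3) := by
    simp [List.map_append, map_snd_pvF]
  rw [hre]
  refine Prod.ext rfl ?_
  simp only []
  apply List.map_congr_left
  intro e he
  have hmem : e ∈ elements := by
    simp only [List.mem_append, List.mem_filter] at he
    rcases he with ((h | h) | h) | h <;> exact h.1
  obtain ⟨k, hk⟩ := index?_isSome_of_mem elements e hmem
  rw [get?_firstFold, hk]
  simp
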